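-- pv_equiv track=rewrite | github.com/Motoiis/Datachecker | Datachecker.py | reset_similar_consecutive_values
-- ===== SOURCE A (Python) =====
-- def reset_similar_consecutive_values(data, threshold, n):
--     count = 0  # 連続カウント用の変数
--     reset_index = -1  # 0にリセットを開始するインデックス
--     data_copy = data.copy()  # 元のデータのコピーを作成
--     prev_value = data_copy[0]  # 最初の値を前回の値として保存
--
--     for i in range(1, len(data_copy)):
--         # 現在のデータと前のデータの差がしきい値より小さいかどうかをチェック
--         if abs(data_copy[i] - prev_value) <= threshold:
--             count += 1
--             # 連続して近似の値がn-1回続いた場合（最初の値を含めるとn回）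
--             if count == n - 1:
--                 reset_index = i - (n - 1)  # 0にリセットを開始するインデックスを設定
--                 break  # 以降のデータを処理する必要がないため、ループを終了
--         else:
--             count = 0  # 連続カウントをリセット
--         prev_value = data_copy[i]  # 現在の値を前回の値として更新
--
--     # reset_index以降のデータを0に変更
--     if reset_index != -1:
--         for i in range(reset_index, len(data_copy)):
--             data_copy[i] = 0
--
--     return data_copy
-- ===== SOURCE B (Python) =====
-- def reset_similar_consecutive_values(data, threshold, n):
--     # Pass 1: closeness flags for consecutive pairs.
--     close = [abs(y - x) <= threshold for x, y in zip(data, data[1:])]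
--     # Pass 2: first window of n-1 consecutive close pairs (= n similar values).
--     m = n - 1
--     reset = -1
--     if m >= 1:
--         for s in range(len(close) - m + 1):
--             if all(close[s:s + m]):
--                 reset = s
--                 break
--     if reset == -1:
--         return data.copy()
--     # Zero the tail in one slice.
--     return data[:reset] + [0] * (len(data) - reset)
-- ===== Notes on version B (the rewrite author's own statement) =====
-- stated objective: alternative
-- what changed: A threads a running counter, previous value and break through one stateful index loop and then zeroes the tail element by element; B separates the task into passes over different structures: it first materialises the list of closeness flags of consecutive pairs, then finds the first all-True window of n-1 flags by a sliding-window scan, and finally zeroes the tail with a single slice concatenation.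
import Mathlib
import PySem

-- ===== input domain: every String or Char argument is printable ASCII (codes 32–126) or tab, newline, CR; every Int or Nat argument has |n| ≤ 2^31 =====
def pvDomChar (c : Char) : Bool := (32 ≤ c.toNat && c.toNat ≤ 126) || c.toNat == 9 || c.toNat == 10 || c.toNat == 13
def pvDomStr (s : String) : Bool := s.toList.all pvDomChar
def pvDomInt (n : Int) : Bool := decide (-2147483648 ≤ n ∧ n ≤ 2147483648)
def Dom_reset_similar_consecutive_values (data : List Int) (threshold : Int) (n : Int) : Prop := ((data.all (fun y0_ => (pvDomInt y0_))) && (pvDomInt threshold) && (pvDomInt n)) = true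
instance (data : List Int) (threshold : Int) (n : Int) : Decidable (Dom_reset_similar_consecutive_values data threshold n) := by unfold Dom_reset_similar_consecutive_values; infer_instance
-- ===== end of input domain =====

-- B replaces A's single stateful run-counting loop by two passes over different
-- structures (a flag list, then a sliding-window scan) plus one slice-built tail;
-- objective: alternative decomposition, not faster.

-- ===== PORT A =====
-- the for-loop of A: state (prev, count, i); 'break' = returning the reset index
def pvAloop (threshold n : Int) : List Int → Int → Int → Int → Int
  | [], _prev, _count, _i => -1
  | x :: xs, prev, count, i =>
    if |x - prev| ≤ threshold then
      (if count + 1 = n - 1 then i - (n - 1)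
       else pvAloop threshold n xs x (count + 1) (i + 1))
    else pvAloop threshold n xs x 0 (i + 1)

def reset_similar_consecutive_values (data : List Int) (threshold : Int) (n : Int) : List Int :=
  match PySem.List.pyGet? data 0 with
  | none => []   -- data[0] raises IndexError: excluded by Pre_
  | some prev0 =>
    let reset := pvAloop threshold n (data.drop 1) prev0 0 1
    if reset ≠ -1 then
      -- for i in range(reset_index, len(data_copy)): data_copy[i] = 0
      (PySem.List.pyRange reset (data.length : Int) 1).foldl (fun acc i => acc.set i.toNat 0) data
    else data

-- ===== PORT B =====
def reset_similar_consecutive_values_alt (data : List Int) (threshold : Int) (n : Int) : List Int :=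
  let close := (data.zip (data.drop 1)).map (fun p => decide (|p.2 - p.1| ≤ threshold))
  let m := n - 1
  let reset : Int :=
    if 1 ≤ m then
      match (PySem.List.pyRange 0 ((close.length : Int) - m + 1) 1).find?
          (fun s => (PySem.List.slice close (some s) (some (s + m))).all id) with
      | some s => s
      | none => -1
    else -1
  if reset = -1 then data
  else PySem.List.slice data none (some reset) ++ List.replicate ((data.length : Int) - reset).toNat 0

-- ===== PRECONDITION & SPEC =====
-- Pre_ excludes only the empty list, on which A raises IndexError (data[0]).
def Pre_reset_similar_consecutive_values (data : List Int) (threshold : Int) (n : Int) : Prop := data ≠ []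
instance (data : List Int) (threshold : Int) (n : Int) : Decidable (Pre_reset_similar_consecutive_values data threshold n) := by unfold Pre_reset_similar_consecutive_values; infer_instance
def pvWitness_reset_similar_consecutive_values : List Int × Int × Int := ([1, 2, 3, 9], 1, 2)

def Spec_reset_similar_consecutive_values (data : List Int) (threshold : Int) (n : Int) (out : List Int) : Prop := out = reset_similar_consecutive_values_alt data threshold n
instance (data : List Int) (threshold : Int) (n : Int) (out : List Int) : Decidable (Spec_reset_similar_consecutive_values data threshold n out) := by unfold Spec_reset_similar_consecutive_values; infer_instance

-- ===== CLAIM (what is proved, stated in full; the proofs are below) =====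
def Claim_equal_reset_similar_consecutive_values : Prop := ∀ (data : List Int) (threshold : Int) (n : Int), Dom_reset_similar_consecutive_values data threshold n → Pre_reset_similar_consecutive_values data threshold n → Spec_reset_similar_consecutive_values data threshold n (reset_similar_consecutive_values data threshold n)

-- ===== LEMMAS AND PROOFS =====

-- closeness flags of consecutive pairs, threaded like A threads prev
def pvFlags (threshold : Int) : Int → List Int → List Bool
  | _, [] => []
  | p, x :: xs => decide (|x - p| ≤ threshold) :: pvFlags threshold x xs

-- first index (within the flag list) at which the run of True flags, started
-- with carry c, reaches m
def pvHa (m : Int) : List Bool → Int → Option Nat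
  | [], _ => none
  | f :: fs, c =>
    if f then
      (if c + 1 = m then some 0 else (pvHa m fs (c + 1)).map (· + 1))
    else (pvHa m fs 0).map (· + 1)

-- first start of an all-True window of length mm
def pvWfind (mm : Nat) : List Bool → Option Nat
  | [] => none
  | f :: fs =>
    if mm ≤ fs.length + 1 ∧ ((f :: fs).take mm).all id then some 0
    else (pvWfind mm fs).map (· + 1)

theorem pvFlags_eq (threshold : Int) : ∀ (xs : List Int) (p : Int),
    ((p :: xs).zip xs).map (fun q => decide (|q.2 - q.1| ≤ threshold)) = pvFlags threshold p xs := by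
  intro xs
  induction xs with
  | nil => intro p; rfl
  | cons x t ih =>
    intro p
    have ih' := ih x
    simp [pvFlags] at ih' ⊢
    exact ih'

theorem pvFlags_length (threshold : Int) : ∀ (xs : List Int) (p : Int),
    (pvFlags threshold p xs).length = xs.length := by
  intro xs
  induction xs with
  | nil => intro p; rfl
  | cons x t ih => intro p; simp [pvFlags, ih x]

theorem pvAloop_eq_pvHa (threshold n : Int) : ∀ (xs : List Int) (p c i : Int),
    pvAloop threshold n xs p c i =
      (match pvHa (n - 1) (pvFlags threshold p xs) c with
       | some j => (i + (j : Int)) - (n - 1)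
       | none => -1) := by
  intro xs
  induction xs with
  | nil => intro p c i; simp [pvAloop, pvFlags, pvHa]
  | cons x t ih =>
    intro p c i
    by_cases hf : |x - p| ≤ threshold
    · by_cases hc : c + 1 = n - 1
      · simp [pvAloop, pvFlags, pvHa, hf, hc]
      · rw [show pvAloop threshold n (x :: t) p c i
              = pvAloop threshold n t x (c + 1) (i + 1) by simp [pvAloop, hf, hc]]
        rw [ih x (c + 1) (i + 1)]
        simp only [pvFlags, pvHa, hf, decide_true, if_true, hc, if_false]
        cases pvHa (n - 1) (pvFlags threshold x t) (c + 1) with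
        | none => rfl
        | some j => simp; ring
    · rw [show pvAloop threshold n (x :: t) p c i
            = pvAloop threshold n t x 0 (i + 1) by simp [pvAloop, hf]]
      rw [ih x 0 (i + 1)]
      simp only [pvFlags, pvHa, hf, decide_false, if_false]
      cases pvHa (n - 1) (pvFlags threshold x t) 0 with
      | none => rfl
      | some j => simp; ring

theorem pvHa_none_of_nonpos (m : Int) (hm : m ≤ 0) : ∀ (fl : List Bool) (c : Int), 0 ≤ c →
    pvHa m fl c = none := by
  intro fl
  induction fl with
  | nil => intro c _; rfl
  | cons f fs ih =>
    intro c hc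
    cases f with
    | true =>
      have : ¬ (c + 1 = m) := by omega
      simp [pvHa, this, ih (c + 1) (by omega)]
    | false => simp [pvHa, ih 0 le_rfl]

theorem pvHa_lb (m : Int) : ∀ (fl : List Bool) (c : Int) (j : Nat), 0 ≤ c →
    pvHa m fl c = some j → m ≤ c + (j : Int) + 1 := by
  intro fl
  induction fl with
  | nil => intro c j _ h; simp [pvHa] at h
  | cons f fs ih =>
    intro c j hc h
    cases f with
    | true =>
      by_cases hcm : c + 1 = m
      · simp [pvHa, hcm] at h
        omega
      · simp [pvHa, hcm] at h
        obtain ⟨j', hj', rfl⟩ := h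
        have := ih (c + 1) j' (by omega) hj'
        push_cast
        omega
    | false =>
      simp [pvHa] at h
      obtain ⟨j', hj', rfl⟩ := h
      have := ih 0 j' le_rfl hj'
      push_cast
      omega

theorem pvHa_lt (m : Int) : ∀ (fl : List Bool) (c : Int) (j : Nat),
    pvHa m fl c = some j → j < fl.length := by
  intro fl
  induction fl with
  | nil => intro c j h; simp [pvHa] at h
  | cons f fs ih =>
    intro c j h
    cases f with
    | true =>
      by_cases hcm : c + 1 = m
      · simp [pvHa, hcm] at h
        simp [List.length_cons]
        omega
      · simp [pvHa, hcm] at h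
        obtain ⟨j', hj', rfl⟩ := h
        have := ih (c + 1) j' hj'
        simp
        omega
    | false =>
      simp [pvHa] at h
      obtain ⟨j', hj', rfl⟩ := h
      have := ih 0 j' hj'
      simp; omega

theorem pvWfind_none_of_short (mm : Nat) : ∀ (fl : List Bool), fl.length < mm →
    pvWfind mm fl = none := by
  intro fl
  induction fl with
  | nil => intro _; rfl
  | cons f fs ih =>
    intro h
    have h1 : ¬ (mm ≤ fs.length + 1) := by simp at h; omega
    simp [pvWfind, h1, ih (by simp at h ⊢; omega)]

theorem pvWfind_some_zero (mm : Nat) (fl : List Bool) (hmm : 1 ≤ mm)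
    (hlen : mm ≤ fl.length) (hall : (fl.take mm).all id = true) : pvWfind mm fl = some 0 := by
  cases fl with
  | nil => simp at hlen; omega
  | cons f fs =>
    have hcond : mm ≤ fs.length + 1 ∧ (((f :: fs).take mm).all id = true) :=
      ⟨by simpa using hlen, hall⟩
    rw [pvWfind, if_pos hcond]

theorem pvWfind_range (mm : Nat) (hmm : 1 ≤ mm) : ∀ (fl : List Bool),
    (List.range (fl.length + 1 - mm)).find? (fun s => ((fl.drop s).take mm).all id) = pvWfind mm fl := by
  intro fl
  induction fl with
  | nil =>
    have : (0 : Nat) + 1 - mm = 0 := by omega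
    simp [this, pvWfind]
  | cons f fs ih =>
    by_cases hlen : mm ≤ fs.length + 1
    · have hr : (f :: fs).length + 1 - mm = (fs.length + 1 - mm) + 1 := by simp; omega
      rw [hr, List.range_succ_eq_map]
      rw [List.find?_cons]
      by_cases hall : ((f :: fs).take mm).all id = true
      · simp only [List.drop_zero, hall]
        rw [pvWfind_some_zero mm (f :: fs) hmm (by simp; omega) hall]
      · have hall' : (((f :: fs).drop 0).take mm).all id = false := by
          simpa using eq_false_of_ne_true hall
        rw [hall']
        simp only [Bool.false_eq_true, if_false]  -- proceed to the mapped tail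
        rw [List.find?_map]
        have hpred : ((fun s => (((f :: fs).drop s).take mm).all id) ∘ (· + 1))
            = (fun s => ((fs.drop s).take mm).all id) := by
          funext s; simp
        rw [hpred, ih]
        simp [pvWfind, hlen, hall]
    · have hr : (f :: fs).length + 1 - mm = 0 := by simp; omega
      rw [hr]
      simp only [List.range_zero, List.find?_nil]
      have := pvWfind_none_of_short mm (f :: fs) (by simp; omega)
      rw [this]

theorem pvWfind_false_barrier (mm : Nat) (hmm : 1 ≤ mm) : ∀ (k : Nat) (fs : List Bool), k < mm →
    pvWfind mm (List.replicate k true ++ false :: fs) = (pvWfind mm fs).map (· + (k + 1)) := by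
  intro k
  induction k with
  | zero =>
    intro fs _
    have hall : ((false :: fs).take mm).all id = false := by
      cases mm with
      | zero => omega
      | succ mm' => simp [List.take]
    simp [pvWfind, hall]
  | succ k' ih =>
    intro fs hk
    have hstep : List.replicate (k' + 1) true ++ false :: fs
        = true :: (List.replicate k' true ++ false :: fs) := by
      simp [List.replicate_succ]
    have hall : ((List.replicate (k' + 1) true ++ false :: fs).take mm).all id = false := by
      obtain ⟨u, hu⟩ : ∃ u, mm - (k' + 1) = u + 1 := ⟨mm - (k' + 1) - 1, by omega⟩
      rw [List.take_append]
      simp only [List.length_replicate, hu, List.take_succ_cons, List.take_replicate]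
      simp
    have hall2 : ((true :: (List.replicate k' true ++ false :: fs)).take mm).all id = false := by
      rw [← hstep]; exact hall
    rw [hstep]
    rw [show pvWfind mm (true :: (List.replicate k' true ++ false :: fs))
          = (pvWfind mm (List.replicate k' true ++ false :: fs)).map (· + 1) by
        simp [pvWfind, hall2]]
    rw [ih fs (by omega), Option.map_map]
    cases pvWfind mm fs with
    | none => rfl
    | some s => simp [Nat.add_assoc]

theorem pvWfind_eq_pvHa (mm : Nat) (hmm : 1 ≤ mm) : ∀ (fl : List Bool) (c : Nat), c < mm →
    pvWfind mm (List.replicate c true ++ fl)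
      = (pvHa (mm : Int) fl (c : Int)).map (fun j => j + c + 1 - mm) := by
  intro fl
  induction fl with
  | nil =>
    intro c hc
    rw [pvHa, List.append_nil]
    rw [pvWfind_none_of_short mm _ (by simp; omega)]
    rfl
  | cons f fs ih =>
    intro c hc
    cases f with
    | true =>
      by_cases hcm : c + 1 = mm
      · have hform : List.replicate c true ++ true :: fs = List.replicate mm true ++ fs := by
          rw [← hcm, List.replicate_succ']; simp
        rw [hform]
        rw [pvWfind_some_zero mm _ hmm (by simp) (by
          rw [List.take_append]
          simp [List.take_replicate])]
        have hcm' : (c : Int) + 1 = (mm : Int) := by omega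
        simp [pvHa, hcm']
        omega
      · have hform : List.replicate c true ++ true :: fs = List.replicate (c + 1) true ++ fs := by
          rw [List.replicate_succ']; simp
        rw [hform, ih (c + 1) (by omega)]
        have hcm' : ¬ ((c : Int) + 1 = (mm : Int)) := by
          intro h; exact hcm (by exact_mod_cast h)
        simp only [pvHa, if_true, hcm', if_false]
        rw [Option.map_map]
        have : ((c : Int) + 1) = ((c + 1 : Nat) : Int) := by push_cast; ring
        rw [this]
        cases pvHa (mm : Int) fs ((c + 1 : Nat) : Int) with
        | none => rfl
        | some j => simp; omega
    | false =>
      rw [pvWfind_false_barrier mm hmm c fs hc]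
      have h0 : pvWfind mm fs = (pvHa (mm : Int) fs ((0 : Nat) : Int)).map (fun j => j + 0 + 1 - mm) := by
        simpa using ih 0 (by omega)
      rw [h0, Option.map_map]
      simp only [pvHa, Bool.false_eq_true, if_false]
      cases hha : pvHa (mm : Int) fs 0 with
      | none => rfl
      | some j =>
        have hlb : (mm : Int) ≤ 0 + (j : Int) + 1 := pvHa_lb (mm : Int) fs 0 j le_rfl hha
        have hlb' : mm ≤ j + 1 := by exact_mod_cast (by omega : (mm : Int) ≤ (j : Int) + 1)
        simp
        omega

-- zeroing loop of A equals take ++ replicate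
theorem pvZero_loop : ∀ (d : Nat) (l : List Int) (r : Nat), r + d = l.length →
    (PySem.List.pyRange (r : Int) (l.length : Int) 1).foldl (fun acc i => acc.set i.toNat 0) l
      = l.take r ++ List.replicate d 0 := by
  intro d
  induction d with
  | zero =>
    intro l r hr
    rw [PySem.List.pyRange_one_eq_nil (show (l.length : Int) ≤ (r : Int) by omega)]
    simp [List.take_of_length_le (show l.length ≤ r by omega)]
  | succ d' ih =>
    intro l r hr
    rw [PySem.List.pyRange_one_cons (by omega : (r : Int) < (l.length : Int))]
    simp only [List.foldl_cons, Int.toNat_natCast]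
    have hlen : (l.set r 0).length = l.length := by simp
    have : ((r : Int) + 1) = (((r + 1 : Nat)) : Int) := by push_cast; ring
    rw [this, ← hlen]
    rw [ih (l.set r 0) (r + 1) (by omega)]
    have hr' : r < l.length := by omega
    have htake : (l.set r 0).take (r + 1) = l.take r ++ [0] := by
      rw [List.take_add_one]
      congr 1
      · rw [List.take_set]
        apply List.set_eq_of_length_le
        simp
      · simp [hr']
    rw [htake, List.append_assoc]
    rfl

-- B's find?-over-pyRange equals pvWfind (cast to Int)
theorem pvBfind (close : List Bool) (m : Int) (hm : 1 ≤ m) :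
    (PySem.List.pyRange 0 ((close.length : Int) - m + 1) 1).find?
        (fun s => (PySem.List.slice close (some s) (some (s + m))).all id)
      = (pvWfind m.toNat close).map (fun s => (s : Int)) := by
  rw [PySem.List.pyRange_one]
  rw [List.find?_map]
  have hK : (((close.length : Int) - m + 1) - 0).toNat = close.length + 1 - m.toNat := by omega
  rw [hK]
  have hmm : m = (m.toNat : Int) := by omega
  have hpred : ((fun s => (PySem.List.slice close (some s) (some (s + m))).all id) ∘ (fun k : Nat => (0 : Int) + (k : Int)))
      = (fun k : Nat => ((close.drop k).take m.toNat).all id) := by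
    funext k
    simp only [Function.comp, zero_add]
    rw [hmm, PySem.List.slice_natCast_add]
    simp
    rw [show (max m 0) = m from max_eq_left (by omega)]
  rw [hpred]
  rw [pvWfind_range m.toNat (by omega) close]
  cases pvWfind m.toNat close <;> simp

-- the two resets coincide (d0 :: rest, threshold, n fixed)
theorem pvMain (data : List Int) (threshold n : Int) (hne : data ≠ []) :
    reset_similar_consecutive_values data threshold n
      = reset_similar_consecutive_values_alt data threshold n := by
  obtain ⟨d0, rest, rfl⟩ : ∃ d0 rest, data = d0 :: rest := by
    cases data with
    | nil => exact absurd rfl hne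
    | cons a l => exact ⟨a, l, rfl⟩
  unfold reset_similar_consecutive_values reset_similar_consecutive_values_alt
  rw [PySem.List.pyGet?_zero_cons]
  simp only [List.drop_succ_cons, List.drop_zero]
  rw [pvFlags_eq threshold rest d0]
  rw [pvAloop_eq_pvHa threshold n rest d0 0 1]
  set fl := pvFlags threshold d0 rest with hfl
  by_cases hm : 1 ≤ n - 1
  · rw [if_pos hm]
    have hwf0 := pvWfind_eq_pvHa (n - 1).toNat (by omega) fl 0 (by omega)
    simp only [List.replicate_zero, List.nil_append, Nat.cast_zero] at hwf0
    rw [show ((n - 1).toNat : Int) = n - 1 by omega] at hwf0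
    cases hha : pvHa (n - 1) fl 0 with
    | none =>
      rw [hha] at hwf0
      have hF : (PySem.List.pyRange 0 ((fl.length : Int) - (n - 1) + 1) 1).find?
          (fun s => (PySem.List.slice fl (some s) (some (s + (n - 1)))).all id) = none := by
        rw [pvBfind fl (n - 1) hm, hwf0]
        rfl
      rw [hF]
      simp
    | some j =>
      rw [hha] at hwf0
      have hlb : (n - 1) ≤ 0 + (j : Int) + 1 := pvHa_lb (n - 1) fl 0 j le_rfl hha
      have hlt : j < fl.length := pvHa_lt (n - 1) fl 0 j hha
      have hfll : fl.length = rest.length := pvFlags_length threshold rest d0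
      set r : Nat := j + 0 + 1 - (n - 1).toNat with hrdef
      have hrInt : (1 + (j : Int)) - (n - 1) = (r : Int) := by omega
      have hF : (PySem.List.pyRange 0 ((fl.length : Int) - (n - 1) + 1) 1).find?
          (fun s => (PySem.List.slice fl (some s) (some (s + (n - 1)))).all id) = some ((r : Nat) : Int) := by
        rw [pvBfind fl (n - 1) hm, hwf0]
        simp
        omega
      rw [hF]
      rw [show (match (some j : Option Nat) with
            | some j => (1 : Int) + (j : Int) - (n - 1)
            | none => (-1 : Int)) = (1 + (j : Int)) - (n - 1) from rfl]
      rw [hrInt]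
      rw [if_pos (show ((r : Int) ≠ -1) by omega), if_neg (show ¬ ((r : Int) = -1) by omega)]
      have hrle : r ≤ (d0 :: rest).length := by simp only [List.length_cons]; omega
      rw [pvZero_loop ((d0 :: rest).length - r) (d0 :: rest) r (by omega)]
      rw [show (match (some ((r : Nat) : Int)) with
            | some s => s
            | none => (-1 : Int)) = ((r : Nat) : Int) from rfl]
      rw [PySem.List.slice_to_natCast]
      congr 1
      · congr 1
        omega
  · rw [if_neg hm]
    have hnone : pvHa (n - 1) fl 0 = none := pvHa_none_of_nonpos (n - 1) (by omega) fl 0 le_rfl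
    rw [hnone]
    simp

-- ===== VERDICT (by name: the statement is the Claim_ definition above) =====
theorem reset_similar_consecutive_values_spec : Claim_equal_reset_similar_consecutive_values := by
  intro data threshold n _hdom hpre
  unfold Spec_reset_similar_consecutive_values
  exact pvMain data threshold n hpre
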